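-- pv_equiv track=rewrite | github.com/MichaelShoemaker/AdventOfCode-2020 | Day15/Non-WorkingDay15-Part2.py | get_index_diff
-- ===== SOURCE A (Python) =====
-- def get_index_diff(check: list) -> int:
--     second_to = 0
--     last = 0
--     for i in range(len(check)):
--         if check[i] == check[-1]:
--             second_to = last
--             last = i
--     return last - second_to
-- ===== SOURCE B (Python) =====
-- def get_index_diff(check: list) -> int:
--     if not check:
--         return 0
--     target = check[-1]
--     last = len(check) - 1
--     second_to = 0
--     for i in range(len(check) - 2, -1, -1):
--         if check[i] == target:
--             second_to = i
--             break
--     return last - second_to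
-- ===== Notes on version B (the rewrite author's own statement) =====
-- stated objective: alternative
-- what changed: B replaces A's full forward scan that maintains the last two matching indices with a backward scan from the second-to-last element that stops at the first match (the last index always matches itself), guarded by an empty-list early return.
import Mathlib
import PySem

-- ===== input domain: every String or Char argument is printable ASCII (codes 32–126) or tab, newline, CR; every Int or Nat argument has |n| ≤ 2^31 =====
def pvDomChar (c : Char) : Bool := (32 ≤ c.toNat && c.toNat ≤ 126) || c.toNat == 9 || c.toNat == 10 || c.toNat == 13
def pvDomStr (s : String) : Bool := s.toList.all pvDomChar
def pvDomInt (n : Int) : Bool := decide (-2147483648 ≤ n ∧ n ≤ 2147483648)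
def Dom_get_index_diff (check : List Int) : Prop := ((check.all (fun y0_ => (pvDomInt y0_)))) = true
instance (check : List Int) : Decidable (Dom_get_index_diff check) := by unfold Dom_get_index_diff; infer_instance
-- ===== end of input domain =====

-- B differs only in structure: backward first-match scan instead of forward last-two tracking.

-- ===== PORT A =====
-- literal port of A: forward loop over range(len(check)), state (second_to, last)
def get_index_diff (check : List Int) : Int :=
  let r := (PySem.List.pyRange 0 (check.length : Int) 1).foldl
    (fun (st : Int × Int) i =>
      if PySem.List.pyGet? check i == PySem.List.pyGet? check (-1) then (st.2, i) else st)
    (0, 0)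
  r.2 - r.1

-- ===== PORT B =====
-- the backward scan with break, as structural recursion over the index list
def gidScanB (check : List Int) (t : Option Int) : List Int → Int
  | [] => 0
  | i :: rest => if PySem.List.pyGet? check i == t then i else gidScanB check t rest

def get_index_diff_alt (check : List Int) : Int :=
  if check = [] then 0
  else
    let t := PySem.List.pyGet? check (-1)
    let last : Int := (check.length : Int) - 1
    let second_to := gidScanB check t (PySem.List.pyRange ((check.length : Int) - 2) (-1) (-1))
    last - second_to

-- ===== PRECONDITION & SPEC =====
def Spec_get_index_diff (check : List Int) (out : Int) : Prop := out = get_index_diff_alt check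
instance (check : List Int) (out : Int) : Decidable (Spec_get_index_diff check out) := by unfold Spec_get_index_diff; infer_instance

-- ===== CLAIM (what is proved, stated in full; the proofs are below) =====
def Claim_equal_get_index_diff : Prop := ∀ (check : List Int), Dom_get_index_diff check → Spec_get_index_diff check (get_index_diff check)

-- ===== LEMMAS AND PROOFS =====

-- A's loop: the second component of the state is the last matching index seen (default: its initial value)
theorem gid_fold_snd (p : Int → Bool) (L : List Int) : ∀ (s l : Int),
    ((L.foldl (fun (st : Int × Int) i => if p i then (st.2, i) else st) (s, l)).2)
      = ((L.filter (fun i => p i)).getLast?).getD l := by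
  induction L with
  | nil => intro s l; simp
  | cons a L ih =>
    intro s l
    by_cases h : p a <;> simp [h, ih, List.getLast?_cons]

-- B's scan: first matching index in the scanned list (default 0)
theorem gid_scan_eq (check : List Int) (t : Option Int) (L : List Int) :
    gidScanB check t L
      = ((L.filter (fun i => PySem.List.pyGet? check i == t)).head?).getD 0 := by
  induction L with
  | nil => simp [gidScanB]
  | cons a L ih =>
    by_cases h : PySem.List.pyGet? check a == t <;> simp [gidScanB, h, ih]

-- ===== VERDICT (by name: the statement is the Claim_ definition above) =====
theorem get_index_diff_spec : Claim_equal_get_index_diff := by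
  intro check _
  unfold Spec_get_index_diff get_index_diff get_index_diff_alt
  by_cases hnil : check = []
  · subst hnil; simp [PySem.List.pyRange_one_eq_nil]
  · simp only [if_neg hnil]
    have hn : 1 ≤ (check.length : Int) := by
      have := List.length_pos_iff.mpr hnil
      exact_mod_cast this
    -- the last index matches the last element
    have hlastmatch : (PySem.List.pyGet? check ((check.length : Int) - 1)
        == PySem.List.pyGet? check (-1)) = true := by
      have hidx : PySem.List.pyIdx? check.length ((check.length : Int) - 1)
          = PySem.List.pyIdx? check.length (-1) := by
        simp only [PySem.List.pyIdx?]
        split_ifs <;> first | rfl | omega | (congr 1; omega)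
      simp only [PySem.List.pyGet?, hidx, beq_self_eq_true]
    -- split A's range at the last index
    have hsplit : PySem.List.pyRange 0 (check.length : Int) 1
        = PySem.List.pyRange 0 ((check.length : Int) - 1) 1 ++ [(check.length : Int) - 1] := by
      have := PySem.List.pyRange_one_succ_right (a := 0) (b := (check.length : Int) - 1) (by omega)
      rw [← this]; congr 1; omega
    -- B's index list is the reverse of A's prefix
    have hrev : PySem.List.pyRange ((check.length : Int) - 2) (-1) (-1)
        = (PySem.List.pyRange 0 ((check.length : Int) - 1) 1).reverse := by
      rw [PySem.List.pyRange_neg_one_eq_reverse]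
      norm_num
      congr 1
      omega
    rw [hsplit, hrev]
    simp only [List.foldl_append, List.foldl_cons, List.foldl_nil, hlastmatch, if_true,
      gid_fold_snd, gid_scan_eq, List.filter_reverse, List.head?_reverse]
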